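-- pv_equiv track=rewrite | github.com/samscarrow/ai-lb | load_balancer/src/load_balancer/routing/strategies.py | _tier_preference
-- ===== SOURCE A (Python) =====
-- from typing import List, Optional, Dict, Any
--
-- def _tier_preference(tier: str) -> List[str]:
--     """Return ordered tier names starting from *tier*, expanding outward."""
--     order = ["small", "medium", "large"]
--     if tier not in order:
--         return order
--     idx = order.index(tier)
--     result = [tier]
--     for offset in range(1, len(order)):
--         if idx - offset >= 0:
--             result.append(order[idx - offset])
--         if idx + offset < len(order):
--             result.append(order[idx + offset])
--     return result
-- ===== SOURCE B (Python) =====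
-- def _tier_preference(tier: str):
--     order = ["small", "medium", "large"]
--     if tier not in order:
--         return order
--     idx = order.index(tier)
--     # stable sort by absolute distance from idx: ties keep lower index first
--     return sorted(order, key=lambda t: abs(order.index(t) - idx))
-- ===== Notes on version B (the rewrite author's own statement) =====
-- stated objective: idiomatic
-- what changed: Replaces the explicit symmetric offset loop with a single stable sort of the fixed tier list keyed by absolute index distance from the target tier (stability supplies A's below-before-above tie-break).
import Mathlib
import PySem

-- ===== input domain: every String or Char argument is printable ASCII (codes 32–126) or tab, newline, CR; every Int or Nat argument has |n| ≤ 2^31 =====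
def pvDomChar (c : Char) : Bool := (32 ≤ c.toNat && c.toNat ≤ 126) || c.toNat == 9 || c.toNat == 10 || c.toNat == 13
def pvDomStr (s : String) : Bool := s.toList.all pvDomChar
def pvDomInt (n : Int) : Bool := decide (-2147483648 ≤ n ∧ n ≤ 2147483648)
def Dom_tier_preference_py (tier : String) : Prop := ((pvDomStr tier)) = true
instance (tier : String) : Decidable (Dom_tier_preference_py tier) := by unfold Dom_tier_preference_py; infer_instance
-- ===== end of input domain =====

-- B replaces A's explicit outward-offset loop by a stable sort keyed by absolute index distance (idiomatic, same cost).

-- ===== PORT A =====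
def tier_preference_py (tier : String) : List String :=
  let order : List String := ["small", "medium", "large"]
  if ¬ order.contains tier then order
  else
    let idx : Int := ((PySem.List.index? order tier).getD 0 : Nat)
    (PySem.List.pyRange 1 (order.length : Int) 1).foldl
      (fun result offset =>
        let result := if idx - offset ≥ 0 then result ++ [PySem.List.pyGetD order (idx - offset) ""] else result
        if idx + offset < (order.length : Int) then result ++ [PySem.List.pyGetD order (idx + offset) ""] else result)
      [tier]

-- ===== PORT B =====
def tier_preference_py_alt (tier : String) : List String :=
  let order : List String := ["small", "medium", "large"]
  if ¬ order.contains tier then order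
  else
    let idx : Int := ((PySem.List.index? order tier).getD 0 : Nat)
    PySem.List.sorted order (fun t => |(((PySem.List.index? order t).getD 0 : Nat) : Int) - idx|) false

-- ===== PRECONDITION & SPEC =====
def Spec_tier_preference_py (tier : String) (out : List String) : Prop := out = tier_preference_py_alt tier
instance (tier : String) (out : List String) : Decidable (Spec_tier_preference_py tier out) := by unfold Spec_tier_preference_py; infer_instance

-- ===== CLAIM (what is proved, stated in full; the proofs are below) =====
def Claim_equal_tier_preference_py : Prop := ∀ (tier : String), Dom_tier_preference_py tier → Spec_tier_preference_py tier (tier_preference_py tier)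

-- ===== LEMMAS AND PROOFS =====

-- ===== VERDICT (by name: the statement is the Claim_ definition above) =====
theorem tier_preference_py_spec : Claim_equal_tier_preference_py := by
  intro tier _
  unfold Spec_tier_preference_py
  by_cases h1 : tier = "small"
  · subst h1; decide
  by_cases h2 : tier = "medium"
  · subst h2; decide
  by_cases h3 : tier = "large"
  · subst h3; decide
  simp [tier_preference_py, tier_preference_py_alt, h1, h2, h3]
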